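-- pv_equiv track=rewrite | github.com/eliottcassidy2000/math | 04-computation/beta2_free_dom_bridge.py | is_connected_cycles
-- ===== SOURCE A (Python) =====
-- def shared_directed_edge(c1, c2):
--     edges1 = {(c1[0],c1[1]), (c1[1],c1[2]), (c1[2],c1[0])}
--     edges2 = {(c2[0],c2[1]), (c2[1],c2[2]), (c2[2],c2[0])}
--     return len(edges1 & edges2) > 0
--
-- def is_connected_cycles(cyc_list):
--     """Check if a list of cycles is connected via shared directed edges."""
--     if not cyc_list:
--         return False
--     nc = len(cyc_list)
--     if nc == 1:
--         return True
--     adj = [[] for _ in range(nc)]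
--     for i in range(nc):
--         for j in range(i+1, nc):
--             if shared_directed_edge(cyc_list[i], cyc_list[j]):
--                 adj[i].append(j)
--                 adj[j].append(i)
--     visited = [False]*nc
--     stack = [0]
--     while stack:
--         v = stack.pop()
--         if visited[v]: continue
--         visited[v] = True
--         for u in adj[v]:
--             if not visited[u]: stack.append(u)
--     return all(visited)
-- ===== SOURCE B (Python) =====
-- def _edge_triple(c):
--     return [(c[0], c[1]), (c[1], c[2]), (c[2], c[0])]
--
-- def is_connected_cycles(cyc_list):
--     """Check if a list of cycles is connected via shared directed edges.
--
--     Instead of the O(n^2) pairwise scan, build an index from each directed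
--     edge to the cycles owning it, and BFS over cycles through that index.
--     """
--     n = len(cyc_list)
--     if n == 0:
--         return False
--     if n == 1:
--         return True
--     edges = [_edge_triple(c) for c in cyc_list]
--     owners = {}
--     for idx, es in enumerate(edges):
--         for e in es:
--             owners.setdefault(e, []).append(idx)
--     visited = [False] * n
--     queue = [0]
--     head = 0
--     while head < len(queue):
--         v = queue[head]
--         head += 1
--         if visited[v]:
--             continue
--         visited[v] = True
--         for e in edges[v]:
--             for u in owners[e]:
--                 if not visited[u]:
--                     queue.append(u)
--     return all(visited)
-- ===== Notes on version B (the rewrite author's own statement) =====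
-- stated objective: faster
-- what changed: Replaces A's O(n^2) all-pairs shared_directed_edge scan plus adjacency-list stack DFS by a dict indexing each directed edge to the cycles owning it, and a BFS over cycles through that index.
import Mathlib
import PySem

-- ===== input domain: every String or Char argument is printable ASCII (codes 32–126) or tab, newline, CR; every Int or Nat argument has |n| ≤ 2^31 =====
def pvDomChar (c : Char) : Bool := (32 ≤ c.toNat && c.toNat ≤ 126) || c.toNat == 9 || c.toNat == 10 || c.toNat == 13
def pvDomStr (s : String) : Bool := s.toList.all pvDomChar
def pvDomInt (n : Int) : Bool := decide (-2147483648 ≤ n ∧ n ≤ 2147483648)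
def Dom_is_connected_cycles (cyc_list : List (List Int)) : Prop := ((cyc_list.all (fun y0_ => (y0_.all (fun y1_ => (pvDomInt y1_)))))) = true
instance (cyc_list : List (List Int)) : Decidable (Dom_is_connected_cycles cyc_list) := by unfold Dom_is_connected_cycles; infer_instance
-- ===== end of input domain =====

-- B replaces A's O(n^2) all-pairs shared-edge scan + stack DFS by a dict indexing each
-- directed edge to its owning cycles and a BFS over that index (measurably faster).

-- ===== PORT A =====

-- termination helper for the worklist loops of both ports (cited in decreasing_by)
theorem pvCountFalseSetLt (visited : List Bool) (v : Int)
    (h : PySem.List.pyGetD visited v true = false) :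
    (PySem.List.pySetD visited v true).count false < visited.count false := by
  unfold PySem.List.pyGetD PySem.List.pyGet? at h
  unfold PySem.List.pySetD PySem.List.pySet?
  cases hidx : PySem.List.pyIdx? visited.length v with
  | none => rw [hidx] at h; simp at h
  | some k =>
    rw [hidx] at h
    simp only [Option.bind_some] at h
    cases hk : visited[k]? with
    | none => rw [hk] at h; simp at h
    | some b =>
      rw [hk] at h
      simp only [Option.getD_some] at h
      subst h
      obtain ⟨hklen, hval⟩ := List.getElem?_eq_some_iff.mp hk
      simp only [Option.map_some, Option.getD_some]
      rw [List.count_set hklen]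
      simp [hval]
      rw [← hval]
      exact visited.getElem_mem hklen

def shared_directed_edge (c1 c2 : List Int) : Bool :=
  -- edges1 = {(c1[0],c1[1]), (c1[1],c1[2]), (c1[2],c1[0])}; likewise edges2; len(edges1 & edges2) > 0
  decide (0 < PySem.Set.len (PySem.Set.inter
    (PySem.Set.ofList [(PySem.List.pyGetD c1 0 0, PySem.List.pyGetD c1 1 0),
                       (PySem.List.pyGetD c1 1 0, PySem.List.pyGetD c1 2 0),
                       (PySem.List.pyGetD c1 2 0, PySem.List.pyGetD c1 0 0)])
    (PySem.Set.ofList [(PySem.List.pyGetD c2 0 0, PySem.List.pyGetD c2 1 0),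
                       (PySem.List.pyGetD c2 1 0, PySem.List.pyGetD c2 2 0),
                       (PySem.List.pyGetD c2 2 0, PySem.List.pyGetD c2 0 0)])))

-- body of the double loop: 'if shared_directed_edge(...): adj[i].append(j); adj[j].append(i)'
def pvAdjStep (cyc_list : List (List Int)) (adj : List (List Int)) (i j : Int) : List (List Int) :=
  if shared_directed_edge (PySem.List.pyGetD cyc_list i []) (PySem.List.pyGetD cyc_list j []) then
    let adj1 := PySem.List.pySetD adj i (PySem.List.pyGetD adj i [] ++ [j])
    PySem.List.pySetD adj1 j (PySem.List.pyGetD adj1 j [] ++ [i])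
  else adj

def pvBuildAdj (cyc_list : List (List Int)) (nc : Int) : List (List Int) :=
  (PySem.List.pyRange 0 nc 1).foldl
    (fun adj i => (PySem.List.pyRange (i + 1) nc 1).foldl
      (fun adj j => pvAdjStep cyc_list adj i j) adj)
    (List.replicate nc.toNat [])

-- 'while stack: v = stack.pop(); …' — stack.pop() takes the LAST element
def pvDfs (adj : List (List Int)) (visited : List Bool) (stack : List Int) : List Bool :=
  if hs : stack = [] then visited
  else
    let v := stack.getLast hs
    if PySem.List.pyGetD visited v true then pvDfs adj visited stack.dropLast
    else
      pvDfs adj (PySem.List.pySetD visited v true)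
        ((PySem.List.pyGetD adj v []).foldl
          (fun s u => if PySem.List.pyGetD (PySem.List.pySetD visited v true) u true then s
                      else s ++ [u])
          stack.dropLast)
  termination_by (visited.count false, stack.length)
  decreasing_by
  · apply Prod.Lex.right
    have : stack.length ≠ 0 := fun h0 => hs (List.eq_nil_of_length_eq_zero h0)
    simp [List.length_dropLast]; omega
  · apply Prod.Lex.left
    apply pvCountFalseSetLt
    simpa using ‹¬PySem.List.pyGetD visited (stack.getLast hs) true = true›

def is_connected_cycles (cyc_list : List (List Int)) : Bool :=
  if cyc_list = [] then false
  else
    let nc : Int := cyc_list.length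
    if nc = 1 then true
    else
      (pvDfs (pvBuildAdj cyc_list nc) (List.replicate nc.toNat false) [0]).all (fun b => b)

-- ===== PORT B =====

def pvEdgeTriple (c : List Int) : List (Int × Int) :=
  [(PySem.List.pyGetD c 0 0, PySem.List.pyGetD c 1 0),
   (PySem.List.pyGetD c 1 0, PySem.List.pyGetD c 2 0),
   (PySem.List.pyGetD c 2 0, PySem.List.pyGetD c 0 0)]

-- 'for idx, es in enumerate(edges): for e in es: owners.setdefault(e, []).append(idx)'
def pvOwners (edges : List (List (Int × Int))) : PySem.Dict (Int × Int) (List Int) :=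
  (PySem.List.enumerate edges 0).foldl
    (fun d p => p.2.foldl (fun d e => d.modify e [] (· ++ [p.1])) d)
    PySem.Dict.empty

-- the head-pointer queue loop, ported as recursion on the not-yet-processed part of the queue
def pvBfs (edges : List (List (Int × Int))) (owners : PySem.Dict (Int × Int) (List Int))
    (visited : List Bool) (queue : List Int) : List Bool :=
  match queue with
  | [] => visited
  | v :: rest =>
    if PySem.List.pyGetD visited v true then pvBfs edges owners visited rest
    else
      pvBfs edges owners (PySem.List.pySetD visited v true)
        ((PySem.List.pyGetD edges v []).foldl
          (fun q e => (PySem.Dict.getD owners e []).foldl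
            (fun q u => if PySem.List.pyGetD (PySem.List.pySetD visited v true) u true then q
                        else q ++ [u]) q)
          rest)
  termination_by (visited.count false, queue.length)
  decreasing_by
  · apply Prod.Lex.right
    simp
  · apply Prod.Lex.left
    apply pvCountFalseSetLt
    simpa using ‹¬PySem.List.pyGetD visited v true = true›

def is_connected_cycles_alt (cyc_list : List (List Int)) : Bool :=
  let n : Int := cyc_list.length
  if n = 0 then false
  else if n = 1 then true
  else
    let edges := cyc_list.map pvEdgeTriple
    (pvBfs edges (pvOwners edges) (List.replicate n.toNat false) [0]).all (fun b => b)

-- ===== PRECONDITION & SPEC =====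

-- Pre_ excludes exactly the inputs on which Python A raises IndexError: lists of two or
-- more cycles in which some cycle has fewer than 3 entries (B raises there as well).
def Pre_is_connected_cycles (cyc_list : List (List Int)) : Prop :=
  cyc_list.length ≤ 1 ∨ ∀ c ∈ cyc_list, 3 ≤ c.length
instance (cyc_list : List (List Int)) : Decidable (Pre_is_connected_cycles cyc_list) := by
  unfold Pre_is_connected_cycles; infer_instance

def pvWitness_is_connected_cycles : List (List Int) := [[1, 2, 3], [2, 3, 4]]

def Spec_is_connected_cycles (cyc_list : List (List Int)) (out : Bool) : Prop :=
  out = is_connected_cycles_alt cyc_list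
instance (cyc_list : List (List Int)) (out : Bool) : Decidable (Spec_is_connected_cycles cyc_list out) := by
  unfold Spec_is_connected_cycles; infer_instance

-- ===== CLAIM (what is proved, stated in full; the proofs are below) =====
def Claim_equal_is_connected_cycles : Prop := ∀ (cyc_list : List (List Int)), Dom_is_connected_cycles cyc_list → Pre_is_connected_cycles cyc_list → Spec_is_connected_cycles cyc_list (is_connected_cycles cyc_list)

-- ===== LEMMAS AND PROOFS =====

-- visited[u] as a proposition
def pvVis (vis : List Bool) (u : Nat) : Prop := vis.getD u false = true

-- one step of the shared-directed-edge graph on cycle indices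
def pvStep (cyc : List (List Int)) (v u : Nat) : Prop :=
  v < cyc.length ∧ u < cyc.length ∧
    ∃ e ∈ pvEdgeTriple (cyc.getD v []), e ∈ pvEdgeTriple (cyc.getD u [])

-- a path from x to u all of whose vertices are unvisited
def pvPathU (vis : List Bool) (cyc : List (List Int)) (x u : Nat) : Prop :=
  ¬ pvVis vis x ∧ Relation.ReflTransGen (fun a b => pvStep cyc a b ∧ ¬ pvVis vis b) x u

lemma pvShared_iff (c1 c2 : List Int) :
    shared_directed_edge c1 c2 = true ↔ ∃ e ∈ pvEdgeTriple c1, e ∈ pvEdgeTriple c2 := by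
  unfold shared_directed_edge
  rw [decide_eq_true_iff]
  have hlen : ∀ (t : PySem.Set (Int × Int)), (0 < PySem.Set.len t) ↔ ∃ x, x ∈ t := by
    intro t
    unfold PySem.Set.len
    rw [Int.natCast_pos, List.length_pos_iff_exists_mem]
  rw [hlen]
  simp only [PySem.Set.mem_inter, PySem.Set.mem_ofList]
  unfold pvEdgeTriple
  tauto

lemma pvStep_symm {cyc : List (List Int)} {v u : Nat} (h : pvStep cyc v u) : pvStep cyc u v := by
  obtain ⟨h1, h2, e, he1, he2⟩ := h
  exact ⟨h2, h1, e, he2, he1⟩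

lemma pvVis_set {vis : List Bool} {vn : Nat} (hvn : vn < vis.length) (u : Nat) :
    pvVis (vis.set vn true) u ↔ pvVis vis u ∨ u = vn := by
  unfold pvVis
  rw [List.getD_eq_getElem?_getD, List.getD_eq_getElem?_getD, List.getElem?_set]
  by_cases he : vn = u
  · subst he; simp [hvn]
  · simp only [he, if_false]
    constructor
    · exact Or.inl
    · rintro (h | h)
      · exact h
      · exact absurd h.symm he

lemma pvGetD_vis {vis : List Bool} {k : Nat} (hk : k < vis.length) :
    PySem.List.pyGetD vis (k : Int) true = true ↔ pvVis vis k := by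
  unfold pvVis
  rw [PySem.List.pyGetD_natCast, List.getD_eq_getElem?_getD, List.getD_eq_getElem?_getD,
    List.getElem?_eq_getElem hk]
  simp

lemma pvPathU_split {cyc : List (List Int)} {visited : List Bool} {vn : Nat}
    (hvn : vn < visited.length) {x u : Nat} (hp : pvPathU visited cyc x u) :
    u = vn ∨ pvPathU (visited.set vn true) cyc x u ∨
      ∃ w, pvStep cyc vn w ∧ pvPathU (visited.set vn true) cyc w u := by
  obtain ⟨hx, hrt⟩ := hp
  induction hrt with
  | refl =>
    by_cases hxv : x = vn
    · exact Or.inl hxv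
    · refine Or.inr (Or.inl ⟨?_, Relation.ReflTransGen.refl⟩)
      rw [pvVis_set hvn]
      rintro (h | h)
      · exact hx h
      · exact hxv h
  | tail hxb hstep ih =>
    rename_i b c
    by_cases huv : c = vn
    · exact Or.inl huv
    · have hvc' : ¬ pvVis (visited.set vn true) c := by
        rw [pvVis_set hvn]
        rintro (h | h)
        · exact hstep.2 h
        · exact huv h
      rcases ih with h1 | h2 | h3
      · subst h1
        exact Or.inr (Or.inr ⟨c, hstep.1, hvc', Relation.ReflTransGen.refl⟩)
      · exact Or.inr (Or.inl ⟨h2.1, h2.2.tail ⟨hstep.1, hvc'⟩⟩)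
      · obtain ⟨w, hw1, hw2, hw3⟩ := h3
        exact Or.inr (Or.inr ⟨w, hw1, hw2, hw3.tail ⟨hstep.1, hvc'⟩⟩)

lemma pvPathU_mono {cyc : List (List Int)} {visited : List Bool} {vn : Nat}
    (hvn : vn < visited.length) {x u : Nat}
    (hp : pvPathU (visited.set vn true) cyc x u) : pvPathU visited cyc x u := by
  obtain ⟨hx, hrt⟩ := hp
  refine ⟨fun h => hx ((pvVis_set hvn x).mpr (Or.inl h)), ?_⟩
  exact hrt.mono fun a b hab => ⟨hab.1, fun h => hab.2 ((pvVis_set hvn b).mpr (Or.inl h))⟩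

lemma pvDfs_length (adj : List (List Int)) (visited : List Bool) (stack : List Int) :
    (pvDfs adj visited stack).length = visited.length := by
  fun_induction pvDfs
  all_goals simp_all [PySem.List.length_pySetD]

lemma pvBfs_length (edges : List (List (Int × Int))) (owners : PySem.Dict (Int × Int) (List Int))
    (visited : List Bool) (queue : List Int) :
    (pvBfs edges owners visited queue).length = visited.length := by
  fun_induction pvBfs
  all_goals simp_all [PySem.List.length_pySetD]


lemma pvIfFlip (c : Bool) (acc : List Int) (x : Int) :
    (if c = true then acc else acc ++ [x]) = (if (!c) = true then acc ++ [x] else acc) := by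
  cases c <;> simp

lemma pvDfs_nil (adj : List (List Int)) (visited : List Bool) : pvDfs adj visited [] = visited := by
  rw [pvDfs]
  rfl

lemma pvDfs_skip (adj : List (List Int)) (visited : List Bool) (stack : List Int)
    (h : stack ≠ []) (hv : PySem.List.pyGetD visited (stack.getLast h) true = true) :
    pvDfs adj visited stack = pvDfs adj visited stack.dropLast := by
  conv_lhs => rw [pvDfs]
  simp only [dif_neg h, hv, if_true]

lemma pvDfs_visit (adj : List (List Int)) (visited : List Bool) (stack : List Int)
    (h : stack ≠ []) (hv : ¬ PySem.List.pyGetD visited (stack.getLast h) true = true) :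
    pvDfs adj visited stack =
      pvDfs adj (PySem.List.pySetD visited (stack.getLast h) true)
        ((PySem.List.pyGetD adj (stack.getLast h) []).foldl
          (fun s u => if PySem.List.pyGetD (PySem.List.pySetD visited (stack.getLast h) true) u true then s
                      else s ++ [u])
          stack.dropLast) := by
  conv_lhs => rw [pvDfs]
  simp only [dif_neg h, hv]
  rfl

lemma pvBfs_nil (edges : List (List (Int × Int))) (owners : PySem.Dict (Int × Int) (List Int))
    (visited : List Bool) : pvBfs edges owners visited [] = visited := by
  rw [pvBfs]

lemma pvBfs_skip (edges : List (List (Int × Int))) (owners : PySem.Dict (Int × Int) (List Int))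
    (visited : List Bool) (v : Int) (rest : List Int)
    (hv : PySem.List.pyGetD visited v true = true) :
    pvBfs edges owners visited (v :: rest) = pvBfs edges owners visited rest := by
  conv_lhs => rw [pvBfs]
  simp only [hv, if_true]

lemma pvBfs_visit (edges : List (List (Int × Int))) (owners : PySem.Dict (Int × Int) (List Int))
    (visited : List Bool) (v : Int) (rest : List Int)
    (hv : ¬ PySem.List.pyGetD visited v true = true) :
    pvBfs edges owners visited (v :: rest) =
      pvBfs edges owners (PySem.List.pySetD visited v true)
        ((PySem.List.pyGetD edges v []).foldl
          (fun q e => (PySem.Dict.getD owners e []).foldl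
            (fun q u => if PySem.List.pyGetD (PySem.List.pySetD visited v true) u true then q
                        else q ++ [u]) q)
          rest) := by
  conv_lhs => rw [pvBfs]
  simp only [hv]
  rfl

-- characterization of the DFS worklist loop
lemma pvDfs_char (cyc adj : List (List Int))
    (hadj : ∀ (vn : Nat) (u : Int), vn < cyc.length →
      (u ∈ adj.getD vn [] ↔ ∃ un : Nat, u = (un : Int) ∧ un < cyc.length ∧ un ≠ vn ∧ pvStep cyc vn un)) :
    ∀ (visited : List Bool) (stack : List Int),
      visited.length = cyc.length →
      (∀ x ∈ stack, ∃ k : Nat, x = (k : Int) ∧ k < cyc.length) →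
      ∀ u : Nat, u < cyc.length →
      (pvVis (pvDfs adj visited stack) u ↔
        pvVis visited u ∨ ∃ x : Nat, (x : Int) ∈ stack ∧ pvPathU visited cyc x u) := by
  intro visited stack
  induction visited, stack using pvDfs.induct adj with
  | case1 visited =>
    intro hlen hstk u hu
    rw [pvDfs_nil]
    simp
  | case2 visited stack h v hv ih =>
    intro hlen hstk u hu
    have hveq : v = stack.getLast h := rfl
    rw [hveq] at hv
    rw [pvDfs_skip adj visited stack h hv]
    obtain ⟨kv, hkveq, hkvn⟩ := hstk _ (List.getLast_mem h)
    have hkvl : kv < visited.length := by omega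
    have hvisv : pvVis visited kv := by
      rw [← pvGetD_vis hkvl, ← hkveq]
      exact hv
    rw [ih hlen (fun x hx => hstk x (List.mem_of_mem_dropLast hx)) u hu]
    constructor
    · rintro (hvu | ⟨x, hx, hp⟩)
      · exact Or.inl hvu
      · exact Or.inr ⟨x, List.mem_of_mem_dropLast hx, hp⟩
    · rintro (hvu | ⟨x, hx, hp⟩)
      · exact Or.inl hvu
      · conv at hx => rw [← List.dropLast_concat_getLast h]
        rcases List.mem_append.mp hx with hx' | hx'
        · exact Or.inr ⟨x, hx', hp⟩
        · have hxkv : x = kv := by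
            have : (x : Int) = (kv : Int) := by
              rw [List.mem_singleton.mp hx', hkveq]
            exact_mod_cast this
          subst hxkv
          exact absurd hvisv hp.1
  | case3 visited stack h v hv ih =>
    intro hlen hstk u hu
    have hveq : v = stack.getLast h := rfl
    rw [hveq] at hv ih
    simp only [dite_eq_ite] at ih
    rw [pvDfs_visit adj visited stack h hv]
    obtain ⟨kv, hkveq, hkvn⟩ := hstk _ (List.getLast_mem h)
    have hkvl : kv < visited.length := by omega
    have hnv : ¬ pvVis visited kv := by
      rw [← pvGetD_vis hkvl, ← hkveq]
      exact hv
    have hset : PySem.List.pySetD visited (stack.getLast h) true = visited.set kv true := by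
      rw [hkveq, PySem.List.pySetD_natCast]
    have hlen' : (PySem.List.pySetD visited (stack.getLast h) true).length = cyc.length := by
      rw [hset, List.length_set, hlen]
    have hvis' : ∀ y : Nat, y < cyc.length →
        (PySem.List.pyGetD (PySem.List.pySetD visited (stack.getLast h) true) (y : Int) true = true
          ↔ pvVis (visited.set kv true) y) := by
      intro y hy
      rw [hset]
      exact pvGetD_vis (by rw [List.length_set]; omega)
    have hadjv : PySem.List.pyGetD adj (stack.getLast h) [] = adj.getD kv [] := by
      rw [hkveq, PySem.List.pyGetD_natCast]
    have hmem : ∀ y : Int,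
        y ∈ (PySem.List.pyGetD adj (stack.getLast h) []).foldl
          (fun s u => if PySem.List.pyGetD (PySem.List.pySetD visited (stack.getLast h) true) u true then s
                      else s ++ [u]) stack.dropLast
        ↔ y ∈ stack.dropLast ∨ (y ∈ adj.getD kv [] ∧
            ¬ PySem.List.pyGetD (PySem.List.pySetD visited (stack.getLast h) true) y true = true) := by
      intro y
      rw [PySem.List.foldl_congr_mem _ _
        (fun s u => if (!(PySem.List.pyGetD (PySem.List.pySetD visited (stack.getLast h) true) u true)) = true
                    then s ++ [u] else s) _
        (fun acc x _ => pvIfFlip _ _ _)]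
      rw [PySem.List.foldl_append_if_eq_filter, hadjv]
      simp [List.mem_filter]
    have hstk' : ∀ x ∈ (PySem.List.pyGetD adj (stack.getLast h) []).foldl
          (fun s u => if PySem.List.pyGetD (PySem.List.pySetD visited (stack.getLast h) true) u true then s
                      else s ++ [u]) stack.dropLast,
        ∃ k : Nat, x = (k : Int) ∧ k < cyc.length := by
      intro x hx
      rcases (hmem x).mp hx with hx' | ⟨hx', -⟩
      · exact hstk x (List.mem_of_mem_dropLast hx')
      · obtain ⟨un, rfl, hun, -, -⟩ := (hadj kv x hkvn).mp hx'
        exact ⟨un, rfl, hun⟩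
    rw [ih hlen' hstk' u hu]
    constructor
    · rintro (hvu | ⟨x, hx, hp⟩)
      · rw [hset, pvVis_set hkvl] at hvu
        rcases hvu with hvu | rfl
        · exact Or.inl hvu
        · exact Or.inr ⟨u, by rw [← hkveq]; exact List.getLast_mem h, hnv, Relation.ReflTransGen.refl⟩
      · rw [hset] at hp
        rcases (hmem (x : Int)).mp hx with hx' | ⟨hx', hxnv'⟩
        · exact Or.inr ⟨x, List.mem_of_mem_dropLast hx', pvPathU_mono hkvl hp⟩
        · obtain ⟨un, hxeq, hun, -, hstepk⟩ := (hadj kv (x : Int) hkvn).mp hx'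
          have hxun : x = un := by exact_mod_cast hxeq
          subst hxun
          have hnvx : ¬ pvVis visited x := fun hvx => hp.1 ((pvVis_set hkvl x).mpr (Or.inl hvx))
          have hmono := pvPathU_mono hkvl hp
          refine Or.inr ⟨kv, by rw [← hkveq]; exact List.getLast_mem h, hnv, ?_⟩
          exact Relation.ReflTransGen.head ⟨hstepk, hnvx⟩ hmono.2
    · rintro (hvu | ⟨x, hx, hp⟩)
      · exact Or.inl (by rw [hset, pvVis_set hkvl]; exact Or.inl hvu)
      · rcases pvPathU_split hkvl hp with rfl | hp' | ⟨w, hstepw, hpw⟩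
        · exact Or.inl (by rw [hset, pvVis_set hkvl]; exact Or.inr rfl)
        · conv at hx => rw [← List.dropLast_concat_getLast h]
          rcases List.mem_append.mp hx with hx' | hx'
          · exact Or.inr ⟨x, (hmem (x : Int)).mpr (Or.inl hx'), by rw [hset]; exact hp'⟩
          · have hxkv : x = kv := by
              have : (x : Int) = (kv : Int) := by rw [List.mem_singleton.mp hx', hkveq]
              exact_mod_cast this
            subst hxkv
            exact absurd ((pvVis_set hkvl x).mpr (Or.inr rfl)) hp'.1
        · have hwn : w < cyc.length := hstepw.2.1
          have hwkv : w ≠ kv := fun hwk => hpw.1 (by rw [hwk, pvVis_set hkvl]; exact Or.inr rfl)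
          have hwadj : (w : Int) ∈ adj.getD kv [] :=
            (hadj kv (w : Int) hkvn).mpr ⟨w, rfl, hwn, hwkv, hstepw⟩
          have hwnv' : ¬ PySem.List.pyGetD (PySem.List.pySetD visited (stack.getLast h) true) (w : Int) true = true := by
            rw [hvis' w hwn]
            exact hpw.1
          exact Or.inr ⟨w, (hmem (w : Int)).mpr (Or.inr ⟨hwadj, hwnv'⟩), by rw [hset]; exact hpw⟩


lemma pvAdjStep_effect (cyc : List (List Int)) (adj : List (List Int)) {n : Nat}
    (hlen : adj.length = n) {i j : Nat} (hij : i < j) (hjn : j < n) :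
    (pvAdjStep cyc adj (i : Int) (j : Int)).length = n ∧
    ∀ (vn : Nat) (u : Int), vn < n →
      (u ∈ (pvAdjStep cyc adj (i : Int) (j : Int)).getD vn [] ↔
        u ∈ adj.getD vn [] ∨
          (shared_directed_edge (PySem.List.pyGetD cyc (i : Int) []) (PySem.List.pyGetD cyc (j : Int) []) = true ∧
            ((vn = i ∧ u = (j : Int)) ∨ (vn = j ∧ u = (i : Int))))) := by
  unfold pvAdjStep
  by_cases hs : shared_directed_edge (PySem.List.pyGetD cyc (i : Int) []) (PySem.List.pyGetD cyc (j : Int) []) = true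
  · rw [if_pos hs]
    simp only [PySem.List.pySetD_natCast, PySem.List.pyGetD_natCast]
    rw [PySem.List.pyGetD_natCast, PySem.List.pyGetD_natCast] at hs
    have hne : i ≠ j := Nat.ne_of_lt hij
    have hne' : j ≠ i := Ne.symm hne
    have hAB : ((adj.set i (adj.getD i [] ++ [(j : Int)])).getD j []) = adj.getD j [] := by
      rw [List.getD_eq_getElem?_getD, List.getD_eq_getElem?_getD, List.getElem?_set]
      simp [hne]
    constructor
    · simp [hlen]
    · intro vn u hvn
      rw [hAB]
      rw [List.getD_eq_getElem?_getD, List.getElem?_set]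
      rcases eq_or_ne j vn with hvj | hvj
      · subst hvj
        rw [if_pos rfl, if_pos (by simp only [List.length_set]; omega)]
        simp only [Option.getD_some, List.mem_append, List.mem_singleton]
        rw [List.getD_eq_getElem?_getD, List.getD_eq_getElem?_getD] at hs
        simp [hs, hne']
      · rw [if_neg hvj, List.getElem?_set]
        rcases eq_or_ne i vn with hvi | hvi
        · subst hvi
          rw [if_pos rfl, if_pos (by omega)]
          simp only [Option.getD_some, List.mem_append, List.mem_singleton]
          rw [List.getD_eq_getElem?_getD, List.getD_eq_getElem?_getD] at hs
          simp [hs, hne]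
        · rw [if_neg hvi, ← List.getD_eq_getElem?_getD]
          constructor
          · exact Or.inl
          · rintro (hm | ⟨-, hc⟩)
            · exact hm
            · rcases hc with ⟨h1, -⟩ | ⟨h1, -⟩
              · exact (hvi h1.symm).elim
              · exact (hvj h1.symm).elim
  · rw [if_neg hs]
    refine ⟨hlen, fun vn u hvn => ?_⟩
    constructor
    · exact Or.inl
    · rintro (hu | ⟨hsh, -⟩)
      · exact hu
      · exact absurd hsh hs

lemma pvAdjFold_char (cyc : List (List Int)) {n : Nat} :
    ∀ (ps : List (Int × Int)) (adj : List (List Int)),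
      adj.length = n →
      (∀ p ∈ ps, ∃ i j : Nat, p = ((i : Int), (j : Int)) ∧ i < j ∧ j < n) →
      ((ps.foldl (fun a p => pvAdjStep cyc a p.1 p.2) adj).length = n ∧
       ∀ (vn : Nat) (u : Int), vn < n →
         (u ∈ (ps.foldl (fun a p => pvAdjStep cyc a p.1 p.2) adj).getD vn [] ↔
           u ∈ adj.getD vn [] ∨
             ∃ p ∈ ps, shared_directed_edge (PySem.List.pyGetD cyc p.1 []) (PySem.List.pyGetD cyc p.2 []) = true ∧
               (((vn : Int) = p.1 ∧ u = p.2) ∨ ((vn : Int) = p.2 ∧ u = p.1)))) := by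
  intro ps
  induction ps with
  | nil => intro adj hlen _; exact ⟨hlen, fun vn u hvn => by simp⟩
  | cons p ps ih =>
    intro adj hlen hps
    obtain ⟨i, j, hp, hij, hjn⟩ := hps p List.mem_cons_self
    subst hp
    obtain ⟨hlen', heff⟩ := pvAdjStep_effect cyc adj hlen hij hjn
    obtain ⟨hlen'', hchar⟩ := ih _ hlen' (fun q hq => hps q (List.mem_cons_of_mem _ hq))
    refine ⟨hlen'', fun vn u hvn => ?_⟩
    rw [List.foldl_cons, hchar vn u hvn, heff vn u hvn]
    simp only [List.mem_cons]
    constructor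
    · rintro ((h | ⟨hsh, hc⟩) | ⟨q, hq, hsh, hc⟩)
      · exact Or.inl h
      · exact Or.inr ⟨((i : Int), (j : Int)), Or.inl rfl, hsh, by
          rcases hc with ⟨h1, h2⟩ | ⟨h1, h2⟩
          · exact Or.inl ⟨by simp [h1], h2⟩
          · exact Or.inr ⟨by simp [h1], h2⟩⟩
      · exact Or.inr ⟨q, Or.inr hq, hsh, hc⟩
    · rintro (h | ⟨q, (rfl | hq), hsh, hc⟩)
      · exact Or.inl (Or.inl h)
      · refine Or.inl (Or.inr ⟨hsh, ?_⟩)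
        rcases hc with ⟨h1, h2⟩ | ⟨h1, h2⟩
        · have h1' : (vn : Int) = (i : Int) := by simpa using h1
          exact Or.inl ⟨by exact_mod_cast h1', h2⟩
        · have h1' : (vn : Int) = (j : Int) := by simpa using h1
          exact Or.inr ⟨by exact_mod_cast h1', h2⟩
      · exact Or.inr ⟨q, hq, hsh, hc⟩

-- characterization of the owners dict
lemma pvOwners_char (edges : List (List (Int × Int))) (e : Int × Int) (u : Int) :
    u ∈ (pvOwners edges).getD e [] ↔
      ∃ k : Nat, ∃ _ : k < edges.length, u = (k : Int) ∧ e ∈ edges.getD k [] := by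
  have h2 : pvOwners edges =
      ((PySem.List.enumerate edges 0).flatMap (fun p => p.2.map (fun e' => (e', p.1)))).foldl
        (fun d q => d.modify q.1 [] (· ++ [q.2])) PySem.Dict.empty := by
    unfold pvOwners
    rw [List.flatMap_def, List.foldl_flatten, List.foldl_map]
    refine PySem.List.foldl_congr_mem _ _ _ _ fun acc p _ => ?_
    rw [List.foldl_map]
  rw [h2, PySem.Dict.getD_foldl_modify_append]
  rw [PySem.Dict.getD_empty]
  simp only [List.nil_append, List.mem_map, List.mem_filter, List.mem_flatMap,
    PySem.List.mem_enumerate_iff]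
  constructor
  · rintro ⟨q, ⟨⟨p, ⟨k, hk, rfl⟩, hq⟩, hqe⟩, rfl⟩
    obtain ⟨e', he', rfl⟩ := hq
    have he : e' = e := by simpa using hqe
    subst he
    refine ⟨k, hk, by simp, ?_⟩
    rw [List.getD_eq_getElem _ _ hk]
    exact he'
  · rintro ⟨k, hk, rfl, he⟩
    rw [List.getD_eq_getElem _ _ hk] at he
    refine ⟨(e, (k : Int)), ⟨⟨((0 : Int) + (k : Int), edges[k]), ⟨k, hk, rfl⟩, ?_⟩, by simp⟩, rfl⟩
    exact ⟨e, he, by simp⟩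

-- characterization of the BFS worklist loop
lemma pvBfs_char (cyc : List (List Int)) :
    ∀ (visited : List Bool) (queue : List Int),
      visited.length = cyc.length →
      (∀ x ∈ queue, ∃ k : Nat, x = (k : Int) ∧ k < cyc.length) →
      ∀ u : Nat, u < cyc.length →
      (pvVis (pvBfs (cyc.map pvEdgeTriple) (pvOwners (cyc.map pvEdgeTriple)) visited queue) u ↔
        pvVis visited u ∨ ∃ x : Nat, (x : Int) ∈ queue ∧ pvPathU visited cyc x u) := by
  intro visited queue
  induction visited, queue using pvBfs.induct (cyc.map pvEdgeTriple) (pvOwners (cyc.map pvEdgeTriple)) with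
  | case1 visited =>
    intro hlen hstk u hu
    rw [pvBfs_nil]
    simp
  | case2 visited v rest hv ih =>
    intro hlen hstk u hu
    rw [pvBfs_skip _ _ _ _ _ hv]
    obtain ⟨kv, rfl, hkvn⟩ := hstk v List.mem_cons_self
    have hkvl : kv < visited.length := by omega
    have hvisv : pvVis visited kv := by
      rw [← pvGetD_vis hkvl]
      exact hv
    rw [ih hlen (fun x hx => hstk x (List.mem_cons_of_mem _ hx)) u hu]
    constructor
    · rintro (hvu | ⟨x, hx, hp⟩)
      · exact Or.inl hvu
      · exact Or.inr ⟨x, List.mem_cons_of_mem _ hx, hp⟩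
    · rintro (hvu | ⟨x, hx, hp⟩)
      · exact Or.inl hvu
      · rcases List.mem_cons.mp hx with hx' | hx'
        · have hxkv : x = kv := by exact_mod_cast hx'
          subst hxkv
          exact absurd hvisv hp.1
        · exact Or.inr ⟨x, hx', hp⟩
  | case3 visited v rest hv ih =>
    intro hlen hstk u hu
    simp only [dite_eq_ite] at ih
    rw [pvBfs_visit _ _ _ _ _ hv]
    obtain ⟨kv, rfl, hkvn⟩ := hstk v List.mem_cons_self
    have hkvl : kv < visited.length := by omega
    have hnv : ¬ pvVis visited kv := by
      rw [← pvGetD_vis hkvl]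
      exact hv
    have hset : PySem.List.pySetD visited ((kv : Int)) true = visited.set kv true :=
      PySem.List.pySetD_natCast _ _ _
    have hlen' : (PySem.List.pySetD visited ((kv : Int)) true).length = cyc.length := by
      rw [hset, List.length_set, hlen]
    have hvis' : ∀ y : Nat, y < cyc.length →
        (PySem.List.pyGetD (PySem.List.pySetD visited ((kv : Int)) true) (y : Int) true = true
          ↔ pvVis (visited.set kv true) y) := by
      intro y hy
      rw [hset]
      exact pvGetD_vis (by rw [List.length_set]; omega)
    have hedgv : PySem.List.pyGetD (cyc.map pvEdgeTriple) ((kv : Int)) [] = pvEdgeTriple (cyc.getD kv []) := by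
      rw [PySem.List.pyGetD_natCast, List.getD_eq_getElem _ _ (by simpa using hkvn),
        List.getElem_map, List.getD_eq_getElem _ _ hkvn]
    have hmem : ∀ y : Int,
        y ∈ (PySem.List.pyGetD (cyc.map pvEdgeTriple) ((kv : Int)) []).foldl
          (fun q e => (PySem.Dict.getD (pvOwners (cyc.map pvEdgeTriple)) e []).foldl
            (fun q u => if PySem.List.pyGetD (PySem.List.pySetD visited ((kv : Int)) true) u true then q
                        else q ++ [u]) q) rest
        ↔ y ∈ rest ∨ ((∃ k : Nat, k < cyc.length ∧ y = (k : Int) ∧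
              ∃ e ∈ pvEdgeTriple (cyc.getD kv []), e ∈ pvEdgeTriple (cyc.getD k [])) ∧
            ¬ PySem.List.pyGetD (PySem.List.pySetD visited ((kv : Int)) true) y true = true) := by
      intro y
      rw [PySem.List.foldl_congr_mem _ _
        (fun q e => q ++ (PySem.Dict.getD (pvOwners (cyc.map pvEdgeTriple)) e []).filter
          (fun u => !(PySem.List.pyGetD (PySem.List.pySetD visited ((kv : Int)) true) u true))) _
        (fun acc e _ => by
          rw [PySem.List.foldl_congr_mem _ _
            (fun q u => if (!(PySem.List.pyGetD (PySem.List.pySetD visited ((kv : Int)) true) u true)) = true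
                        then q ++ [u] else q) _
            (fun acc2 x _ => pvIfFlip _ _ _)]
          rw [PySem.List.foldl_append_if_eq_filter])]
      rw [PySem.List.foldl_append_eq_flatMap, hedgv]
      simp only [List.mem_append, List.mem_flatMap, List.mem_filter]
      constructor
      · rintro (hy | ⟨e, he, hyo, hynv⟩)
        · exact Or.inl hy
        · rw [pvOwners_char] at hyo
          obtain ⟨k, hk, rfl, hek⟩ := hyo
          rw [List.getD_eq_getElem _ _ hk, List.getElem_map] at hek
          refine Or.inr ⟨⟨k, by simpa using hk, rfl, e, he, ?_⟩, by simpa using hynv⟩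
          rwa [List.getD_eq_getElem _ _ (by simpa using hk)]
      · rintro (hy | ⟨⟨k, hk, rfl, e, he1, he2⟩, hynv⟩)
        · exact Or.inl hy
        · refine Or.inr ⟨e, he1, ?_, by simpa using hynv⟩
          rw [pvOwners_char]
          refine ⟨k, by simpa using hk, rfl, ?_⟩
          rw [List.getD_eq_getElem _ _ (by simpa using hk), List.getElem_map,
            ← List.getD_eq_getElem cyc [] hk]
          exact he2
    have hstk' : ∀ x ∈ (PySem.List.pyGetD (cyc.map pvEdgeTriple) ((kv : Int)) []).foldl
          (fun q e => (PySem.Dict.getD (pvOwners (cyc.map pvEdgeTriple)) e []).foldl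
            (fun q u => if PySem.List.pyGetD (PySem.List.pySetD visited ((kv : Int)) true) u true then q
                        else q ++ [u]) q) rest,
        ∃ k : Nat, x = (k : Int) ∧ k < cyc.length := by
      intro x hx
      rcases (hmem x).mp hx with hx' | ⟨⟨k, hk, rfl, -⟩, -⟩
      · exact hstk x (List.mem_cons_of_mem _ hx')
      · exact ⟨k, rfl, hk⟩
    rw [ih hlen' hstk' u hu]
    constructor
    · rintro (hvu | ⟨x, hx, hp⟩)
      · rw [hset, pvVis_set hkvl] at hvu
        rcases hvu with hvu | rfl
        · exact Or.inl hvu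
        · exact Or.inr ⟨u, List.mem_cons_self, hnv, Relation.ReflTransGen.refl⟩
      · rw [hset] at hp
        rcases (hmem (x : Int)).mp hx with hx' | ⟨⟨k, hk, hxk, e, he1, he2⟩, hxnv'⟩
        · exact Or.inr ⟨x, List.mem_cons_of_mem _ hx', pvPathU_mono hkvl hp⟩
        · have hxun : x = k := by exact_mod_cast hxk
          subst hxun
          have hstepk : pvStep cyc kv x := ⟨hkvn, hk, e, he1, he2⟩
          have hnvx : ¬ pvVis visited x := fun hvx => hp.1 ((pvVis_set hkvl x).mpr (Or.inl hvx))
          have hmono := pvPathU_mono hkvl hp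
          refine Or.inr ⟨kv, List.mem_cons_self, hnv, ?_⟩
          exact Relation.ReflTransGen.head ⟨hstepk, hnvx⟩ hmono.2
    · rintro (hvu | ⟨x, hx, hp⟩)
      · exact Or.inl (by rw [hset, pvVis_set hkvl]; exact Or.inl hvu)
      · rcases pvPathU_split hkvl hp with rfl | hp' | ⟨w, hstepw, hpw⟩
        · exact Or.inl (by rw [hset, pvVis_set hkvl]; exact Or.inr rfl)
        · rcases List.mem_cons.mp hx with hx' | hx'
          · have hxkv : x = kv := by exact_mod_cast hx'
            subst hxkv
            exact absurd ((pvVis_set hkvl x).mpr (Or.inr rfl)) hp'.1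
          · exact Or.inr ⟨x, (hmem (x : Int)).mpr (Or.inl hx'), by rw [hset]; exact hp'⟩
        · have hwn : w < cyc.length := hstepw.2.1
          have hwnv' : ¬ PySem.List.pyGetD (PySem.List.pySetD visited ((kv : Int)) true) (w : Int) true = true := by
            rw [hvis' w hwn]
            exact hpw.1
          refine Or.inr ⟨w, (hmem (w : Int)).mpr (Or.inr ⟨⟨w, hwn, rfl, hstepw.2.2⟩, hwnv'⟩), by rw [hset]; exact hpw⟩

-- adjacency-list characterization
lemma pvBuildAdj_char (cyc : List (List Int)) :
    ∀ (vn : Nat) (u : Int), vn < cyc.length →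
      (u ∈ (pvBuildAdj cyc (cyc.length : Int)).getD vn [] ↔
        ∃ un : Nat, u = (un : Int) ∧ un < cyc.length ∧ un ≠ vn ∧ pvStep cyc vn un) := by
  intro vn u hvn
  have hfold : pvBuildAdj cyc (cyc.length : Int)
      = (((PySem.List.pyRange 0 (cyc.length : Int) 1).map
            (fun i => (PySem.List.pyRange (i + 1) (cyc.length : Int) 1).map
              (fun j => ((i, j) : Int × Int)))).flatten).foldl
          (fun a p => pvAdjStep cyc a p.1 p.2) (List.replicate cyc.length []) := by
    unfold pvBuildAdj
    rw [List.foldl_flatten, List.foldl_map]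
    simp only [List.foldl_map, Int.toNat_natCast]
  have hPS : ∀ p ∈ (((PySem.List.pyRange 0 (cyc.length : Int) 1).map
            (fun i => (PySem.List.pyRange (i + 1) (cyc.length : Int) 1).map
              (fun j => ((i, j) : Int × Int)))).flatten),
      ∃ i j : Nat, p = ((i : Int), (j : Int)) ∧ i < j ∧ j < cyc.length := by
    intro p hp
    simp only [List.mem_flatten, List.mem_map] at hp
    obtain ⟨l, ⟨iI, hiI, rfl⟩, hpl⟩ := hp
    simp only [List.mem_map] at hpl
    obtain ⟨jI, hjI, rfl⟩ := hpl
    rw [PySem.List.mem_pyRange_one] at hiI hjI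
    refine ⟨iI.toNat, jI.toNat, ?_, by omega, by omega⟩
    rw [Int.toNat_of_nonneg (by omega), Int.toNat_of_nonneg (by omega)]
  obtain ⟨-, hchar⟩ := pvAdjFold_char cyc _ (List.replicate cyc.length []) (by simp) hPS
  rw [hfold, hchar vn u hvn]
  have hbase : (List.replicate cyc.length ([] : List Int)).getD vn [] = [] := by
    rw [List.getD_eq_getElem?_getD, List.getElem?_replicate]
    split <;> simp
  rw [hbase]
  simp only [List.not_mem_nil, false_or]
  constructor
  · rintro ⟨p, hpPS, hsh, hc⟩
    obtain ⟨i, j, rfl, hij, hjn⟩ := hPS p hpPS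
    simp only at hc hsh
    rw [PySem.List.pyGetD_natCast, PySem.List.pyGetD_natCast, pvShared_iff] at hsh
    rcases hc with ⟨h1, h2⟩ | ⟨h1, h2⟩
    · have hvi : vn = i := by exact_mod_cast h1
      subst hvi
      exact ⟨j, h2, hjn, by omega, hvn, hjn, hsh⟩
    · have hvj : vn = j := by exact_mod_cast h1
      subst hvj
      refine ⟨i, h2, by omega, by omega, pvStep_symm ⟨by omega, hvn, hsh⟩⟩
  · rintro ⟨un, rfl, hun, hne, hstep⟩
    have hmemPS : ∀ (a b : Nat), a < b → b < cyc.length →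
        (((a : Int), (b : Int)) : Int × Int) ∈ (((PySem.List.pyRange 0 (cyc.length : Int) 1).map
            (fun i => (PySem.List.pyRange (i + 1) (cyc.length : Int) 1).map
              (fun j => ((i, j) : Int × Int)))).flatten) := by
      intro a b hab hbn
      simp only [List.mem_flatten, List.mem_map]
      refine ⟨(PySem.List.pyRange ((a : Int) + 1) (cyc.length : Int) 1).map
          (fun j => (((a : Int), j) : Int × Int)), ⟨(a : Int), ?_, rfl⟩, ?_⟩
      · rw [PySem.List.mem_pyRange_one]
        omega
      · simp only [List.mem_map]
        exact ⟨(b : Int), by rw [PySem.List.mem_pyRange_one]; omega, rfl⟩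
    rcases Nat.lt_or_ge vn un with hvu | hvu
    · refine ⟨((vn : Int), (un : Int)), hmemPS vn un hvu hun, ?_, Or.inl ⟨rfl, rfl⟩⟩
      simp only [PySem.List.pyGetD_natCast]
      rw [pvShared_iff]
      exact hstep.2.2
    · have hvu' : un < vn := by omega
      refine ⟨((un : Int), (vn : Int)), hmemPS un vn hvu' hvn, ?_, Or.inr ⟨rfl, rfl⟩⟩
      simp only [PySem.List.pyGetD_natCast]
      rw [pvShared_iff]
      exact (pvStep_symm hstep).2.2

lemma pvVis_replicate (n y : Nat) : ¬ pvVis (List.replicate n false) y := by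
  unfold pvVis
  rw [List.getD_eq_getElem?_getD, List.getElem?_replicate]
  split <;> simp

lemma pvPathU_replicate (cyc : List (List Int)) (n : Nat) (x u : Nat) :
    pvPathU (List.replicate n false) cyc x u ↔ Relation.ReflTransGen (pvStep cyc) x u := by
  have hv : ∀ y, ¬ pvVis (List.replicate n false) y := by
    intro y
    unfold pvVis
    rw [List.getD_eq_getElem?_getD, List.getElem?_replicate]
    split <;> simp
  constructor
  · rintro ⟨-, h⟩
    exact h.mono fun a b hab => hab.1
  · intro h
    exact ⟨hv x, h.mono fun a b hab => ⟨hab, hv b⟩⟩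

lemma pvA_iff (cyc : List (List Int)) (hn : 2 ≤ cyc.length) :
    (is_connected_cycles cyc = true ↔ ∀ u < cyc.length, Relation.ReflTransGen (pvStep cyc) 0 u) := by
  have h0 : cyc ≠ [] := by intro h; rw [h] at hn; simp at hn
  have h1 : ¬ ((cyc.length : Int) = 1) := by omega
  simp only [is_connected_cycles, if_neg h0, if_neg h1, Int.toNat_natCast]
  have hres := pvDfs_char cyc (pvBuildAdj cyc (cyc.length : Int))
    (fun vn u hvn => pvBuildAdj_char cyc vn u hvn)
    (List.replicate cyc.length false) [0] (by simp)
    (by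
      intro x hx
      rw [List.mem_singleton] at hx
      exact ⟨0, by simp [hx], by omega⟩)
  have hlenr : (pvDfs (pvBuildAdj cyc (cyc.length : Int)) (List.replicate cyc.length false) [0]).length
      = cyc.length := by
    rw [pvDfs_length]
    simp
  have hres' : ∀ u : Nat, u < cyc.length →
      (pvVis (pvDfs (pvBuildAdj cyc (cyc.length : Int)) (List.replicate cyc.length false) [0]) u ↔
        Relation.ReflTransGen (pvStep cyc) 0 u) := by
    intro u hu
    rw [hres u hu]
    constructor
    · rintro (hvis | ⟨x, hx, hp⟩)
      · exact absurd hvis (pvVis_replicate _ _)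
      · have hx0 : x = 0 := by exact_mod_cast List.mem_singleton.mp hx
        subst hx0
        exact (pvPathU_replicate cyc _ _ _).mp hp
    · intro h
      exact Or.inr ⟨0, by simp, (pvPathU_replicate cyc _ _ _).mpr h⟩
  rw [List.all_eq_true]
  constructor
  · intro hall u hu
    refine (hres' u hu).mp ?_
    unfold pvVis
    rw [List.getD_eq_getElem _ _ (by omega)]
    exact hall _ (List.getElem_mem _)
  · intro hrt x hx
    obtain ⟨u, hu, hxeq⟩ := List.mem_iff_getElem.mp hx
    have hun : u < cyc.length := by omega
    have := (hres' u hun).mpr (hrt u hun)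
    unfold pvVis at this
    rw [List.getD_eq_getElem _ _ hu] at this
    rw [← hxeq]
    exact this

lemma pvB_iff (cyc : List (List Int)) (hn : 2 ≤ cyc.length) :
    (is_connected_cycles_alt cyc = true ↔ ∀ u < cyc.length, Relation.ReflTransGen (pvStep cyc) 0 u) := by
  have h0 : ¬ ((cyc.length : Int) = 0) := by omega
  have h1 : ¬ ((cyc.length : Int) = 1) := by omega
  simp only [is_connected_cycles_alt, if_neg h0, if_neg h1, Int.toNat_natCast]
  have hres := pvBfs_char cyc (List.replicate cyc.length false) [0] (by simp)
    (by
      intro x hx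
      rw [List.mem_singleton] at hx
      exact ⟨0, by simp [hx], by omega⟩)
  have hlenr : (pvBfs (cyc.map pvEdgeTriple) (pvOwners (cyc.map pvEdgeTriple))
      (List.replicate cyc.length false) [0]).length = cyc.length := by
    rw [pvBfs_length]
    simp
  have hres' : ∀ u : Nat, u < cyc.length →
      (pvVis (pvBfs (cyc.map pvEdgeTriple) (pvOwners (cyc.map pvEdgeTriple))
          (List.replicate cyc.length false) [0]) u ↔
        Relation.ReflTransGen (pvStep cyc) 0 u) := by
    intro u hu
    rw [hres u hu]
    constructor
    · rintro (hvis | ⟨x, hx, hp⟩)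
      · exact absurd hvis (pvVis_replicate _ _)
      · have hx0 : x = 0 := by exact_mod_cast List.mem_singleton.mp hx
        subst hx0
        exact (pvPathU_replicate cyc _ _ _).mp hp
    · intro h
      exact Or.inr ⟨0, by simp, (pvPathU_replicate cyc _ _ _).mpr h⟩
  rw [List.all_eq_true]
  constructor
  · intro hall u hu
    refine (hres' u hu).mp ?_
    unfold pvVis
    rw [List.getD_eq_getElem _ _ (by omega)]
    exact hall _ (List.getElem_mem _)
  · intro hrt x hx
    obtain ⟨u, hu, hxeq⟩ := List.mem_iff_getElem.mp hx
    have hun : u < cyc.length := by omega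
    have := (hres' u hun).mpr (hrt u hun)
    unfold pvVis at this
    rw [List.getD_eq_getElem _ _ hu] at this
    rw [← hxeq]
    exact this

-- ===== VERDICT (by name: the statement is the Claim_ definition above) =====
theorem is_connected_cycles_spec : Claim_equal_is_connected_cycles := by
  intro cyc _dom _pre
  unfold Spec_is_connected_cycles
  rcases Nat.lt_or_ge cyc.length 2 with hl | hn
  · rcases hl1 : cyc.length with _ | m
    · have hnil : cyc = [] := List.eq_nil_of_length_eq_zero hl1
      subst hnil
      simp [is_connected_cycles, is_connected_cycles_alt]
    · have h0 : cyc ≠ [] := by intro h; rw [h] at hl1; simp at hl1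
      have hm : m = 0 := by omega
      subst hm
      simp [is_connected_cycles, is_connected_cycles_alt, h0, hl1]
  · have hA := pvA_iff cyc hn
    have hB := pvB_iff cyc hn
    by_cases ha : is_connected_cycles cyc = true
    · rw [ha]
      exact (hB.mpr (hA.mp ha)).symm
    · have hb : ¬ is_connected_cycles_alt cyc = true := fun hbb => ha (hA.mpr (hB.mp hbb))
      rw [Bool.not_eq_true] at ha hb
      rw [ha, hb]
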